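-- pv_equiv track=rewrite | github.com/triazo/meshblend | loop.py | vertex_to_faces
-- ===== SOURCE A (Python) =====
-- def vertex_to_faces(faces):
--     vert_to_face = {}
--     for i in range(0,len(faces)):
--         for j in range (0,len(faces[i])):
--             vert = faces[i][j]
--             if vert not in vert_to_face.keys():
--                 vert_to_face[vert] = []
--             vert_to_face[vert].append((i,j))
--
--     """
--     bpy.ops.object.editmode_toggle()
--     bpy.ops.mesh.select_all(action='TOGGLE')
--     mesh=bmesh.from_edit_mesh(bpy.context.object.data)
--     mesh.verts.ensure_lookup_table()
--     for item in vert_to_face.keys():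
--         if (len(vert_to_face[item])!= 4):
--             print (vert_to_face[item])
--             mesh.verts[item].select=True
--             # trigger viewport update
--             bpy.context.scene.objects.active = bpy.context.scene.objects.active
--     """
--     return vert_to_face
-- ===== SOURCE B (Python) =====
-- def vertex_to_faces(faces):
--     # Flatten all occurrences, take keys in first-appearance order, then group per key by filtering.
--     occ = [(v, (i, j)) for i, row in enumerate(faces) for j, v in enumerate(row)]
--     keys = dict.fromkeys(v for v, _ in occ)
--     return {v: [p for w, p in occ if w == v] for v in keys}
-- ===== Notes on version B (the rewrite author's own statement) =====
-- stated objective: alternative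
-- what changed: Replaces the single-pass dict-building loop (setdefault-then-append per occurrence) with a flatten/dedup/group decomposition: collect all (vertex,(i,j)) occurrences in one comprehension, take the distinct vertices in first-appearance order with dict.fromkeys, then build the result with one filtering comprehension per key.
import Mathlib
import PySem

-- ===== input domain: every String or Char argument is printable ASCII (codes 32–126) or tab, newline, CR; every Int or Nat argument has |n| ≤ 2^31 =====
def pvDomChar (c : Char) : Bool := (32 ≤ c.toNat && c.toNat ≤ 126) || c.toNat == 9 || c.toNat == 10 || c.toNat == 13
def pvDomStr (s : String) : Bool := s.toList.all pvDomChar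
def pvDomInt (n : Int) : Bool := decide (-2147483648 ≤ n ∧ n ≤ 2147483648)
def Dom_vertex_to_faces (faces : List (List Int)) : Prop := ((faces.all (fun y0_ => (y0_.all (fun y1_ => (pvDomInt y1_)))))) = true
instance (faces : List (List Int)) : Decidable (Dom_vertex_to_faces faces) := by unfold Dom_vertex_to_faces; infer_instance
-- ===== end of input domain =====

-- B replaces A's one-pass dict-building loop by flatten / dedup keys / per-key filter (alternative decomposition, same values).
-- ===== PORT A =====
-- A: for i in range(len(faces)): for j in range(len(faces[i])): if absent insert [], then append (i,j).
def vertex_to_faces (faces : List (List Int)) : List (Int × List (Int × Int)) :=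
  ((PySem.List.pyRange 0 (PySem.List.len faces) 1).foldl (fun d i =>
    (PySem.List.pyRange 0 (PySem.List.len (PySem.List.pyGetD faces i [])) 1).foldl (fun d j =>
      let vert := PySem.List.pyGetD (PySem.List.pyGetD faces i []) j 0
      let d := if d.contains vert then d else d.insert vert []
      d.modify vert [] (fun l => l ++ [(i, j)])) d)
    PySem.Dict.empty).items

-- ===== PORT B =====
-- B: occ = all (v,(i,j)); keys = dict.fromkeys(first components); result = {v: [p for w,p in occ if w==v] for v in keys}.
def vertex_to_faces_alt (faces : List (List Int)) : List (Int × List (Int × Int)) :=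
  let occ := (PySem.List.enumerate faces 0).flatMap
    (fun ir => (PySem.List.enumerate ir.2 0).map (fun jv => (jv.2, (ir.1, jv.1))))
  let keys := PySem.List.dedup (occ.map (·.1))
  keys.map (fun v => (v, (occ.filter (fun wp => wp.1 == v)).map (·.2)))

-- ===== PRECONDITION & SPEC =====
def Spec_vertex_to_faces (faces : List (List Int)) (out : List (Int × List (Int × Int))) : Prop := out = vertex_to_faces_alt faces
instance (faces : List (List Int)) (out : List (Int × List (Int × Int))) : Decidable (Spec_vertex_to_faces faces out) := by unfold Spec_vertex_to_faces; infer_instance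

-- ===== CLAIM (what is proved, stated in full; the proofs are below) =====
def Claim_equal_vertex_to_faces : Prop := ∀ (faces : List (List Int)), Dom_vertex_to_faces faces → Spec_vertex_to_faces faces (vertex_to_faces faces)

-- ===== LEMMAS AND PROOFS =====

-- A's loop body equals a plain modify-append step (the insert of [] before the first append is absorbed by modify's default).
lemma step_eq_modify (d : PySem.Dict Int (List (Int × Int))) (v : Int) (p : Int × Int) :
    (if d.contains v then d else d.insert v []).modify v [] (fun l => l ++ [p])
      = d.modify v [] (fun l => l ++ [p]) := by
  by_cases h : d.contains v = true
  · simp [h]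
  · simp only [Bool.not_eq_true] at h
    simp only [h, Bool.false_eq_true, if_false, PySem.Dict.modify,
      PySem.Dict.getD_insert_self, PySem.Dict.insert_insert_self,
      PySem.Dict.getD_of_not_contains d _ h]

-- A's whole double loop builds the modify-append fold over the flattened occurrence list.
lemma a_eq_fold (faces : List (List Int)) :
    vertex_to_faces faces =
      (((PySem.List.enumerate faces 0).flatMap
          (fun ir => (PySem.List.enumerate ir.2 0).map (fun jv => (jv.2, (ir.1, jv.1))))).foldl
        (fun d wp => d.modify wp.1 [] (fun l => l ++ [wp.2])) PySem.Dict.empty).items := by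
  unfold vertex_to_faces
  rw [List.foldl_flatMap]
  congr 1
  rw [PySem.List.enumerate_eq_map_pyRange faces ([] : List Int), List.foldl_map]
  apply PySem.List.foldl_congr_mem
  intro d i _
  simp only
  rw [PySem.List.enumerate_eq_map_pyRange (PySem.List.pyGetD faces i []) (0 : Int),
    List.foldl_map, List.foldl_map]
  apply PySem.List.foldl_congr_mem
  intro d' jv _
  exact step_eq_modify d' _ _

-- The modify-append fold over an occurrence list, read back as items: grouped by first-appearance key order.
lemma items_group (occ : List (Int × (Int × Int))) :
    (occ.foldl (fun d wp => d.modify wp.1 [] (fun l => l ++ [wp.2])) PySem.Dict.empty).items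
      = (PySem.List.dedup (occ.map (·.1))).map
          (fun v => (v, (occ.filter (fun wp => wp.1 == v)).map (·.2))) := by
  have hnodup := PySem.Dict.nodup_keys_foldl_modify_key occ (fun wp => wp.1) []
    (fun _ wp l => l ++ [wp.2]) PySem.Dict.empty PySem.Dict.nodup_keys_empty
  have hkeys := PySem.Dict.keys_foldl_modify_key occ (fun wp => wp.1) []
    (fun _ wp l => l ++ [wp.2]) PySem.Dict.empty
  simp only at hnodup hkeys
  rw [PySem.Dict.items_eq_map_keys _ hnodup [], hkeys, PySem.Dict.keys_empty,
    PySem.List.dedup_eq_ofList]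
  apply List.map_congr_left
  intro k _
  rw [PySem.Dict.getD_foldl_modify_append, PySem.Dict.getD_empty]
  rfl

-- ===== VERDICT (by name: the statement is the Claim_ definition above) =====
theorem vertex_to_faces_spec : Claim_equal_vertex_to_faces := by
  intro faces _
  unfold Spec_vertex_to_faces vertex_to_faces_alt
  rw [a_eq_fold]
  exact items_group _
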